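-- pv_equiv track=rewrite | github.com/GangCoding/PythonCT | clary97/part3/09_문자열압축.py | solution
-- ===== SOURCE A (Python) =====
-- def solution(s):
--     answer = len(s)
--
--     # 1개의 i부터 압축 단위를 늘려가며 확인
--     for i in range(1, (len(s)//2)+1) :
--         compressed = ""
--         string = s[0:i]
--         num = 1
--
--         # i 크기만큼 증가시키며 이전 문자열과 비교
--         for j in range(i, len(s), i) :
--
--             # 이전 상태와 동일하다면 압축 횟수(num) 증가
--             if string == s[j:j + i] :
--                 num += 1
--
--             # 다른 문자열이 나왔다면
--             else :
--                 compressed += str(num) + string if num >= 2 else string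
--                 string = s[j:j + i]
--                 num = 1
--
--         # 남아있는 문자열에 대해 처리
--         compressed += str(num) + string if num >= 2 else string
--
--         answer = min(answer, len(compressed))  # 문자열중 가장 작은것
--
--     return answer
-- ===== SOURCE B (Python) =====
-- def solution(s):
--     n = len(s)
--     best = n
--     for i in range(1, n // 2 + 1):
--         # m[k] = longest common extension: length of the longest common prefix
--         # of s[k:] and s[k+i:], computed right-to-left in O(n); then chunks at
--         # j-i and j are equal iff m[j-i] >= i, so no substrings are ever built.
--         m = [0]
--         for k in range(n - i - 1, -1, -1):
--             m.append(m[-1] + 1 if s[k] == s[k + i] else 0)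
--         m.reverse()
--         total, run, start = 0, 1, 0
--         for j in range(i, n, i):
--             if m[j - i] >= i:
--                 run += 1
--             else:
--                 total += i + (len(str(run)) if run >= 2 else 0)
--                 run, start = 1, j
--         total += min(i, n - start) + (len(str(run)) if run >= 2 else 0)
--         best = min(best, total)
--     return best
-- ===== Notes on version B (the rewrite author's own statement) =====
-- stated objective: alternative
-- what changed: B never compares or builds substrings: for each chunk size i it precomputes a longest-common-extension array m (m[k] = lcp of s[k:] and s[k+i:]) by a right-to-left DP over single characters, decides chunk equality by the integer test m[j-i] >= i against the adjacent chunk, and accumulates the compressed length arithmetically; A slices chunks, compares strings and concatenates the compressed string. Same O(n^2) character work, but B's runs in pure Python where A's runs in C slicing, so B is slower on large inputs.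
import Mathlib
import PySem

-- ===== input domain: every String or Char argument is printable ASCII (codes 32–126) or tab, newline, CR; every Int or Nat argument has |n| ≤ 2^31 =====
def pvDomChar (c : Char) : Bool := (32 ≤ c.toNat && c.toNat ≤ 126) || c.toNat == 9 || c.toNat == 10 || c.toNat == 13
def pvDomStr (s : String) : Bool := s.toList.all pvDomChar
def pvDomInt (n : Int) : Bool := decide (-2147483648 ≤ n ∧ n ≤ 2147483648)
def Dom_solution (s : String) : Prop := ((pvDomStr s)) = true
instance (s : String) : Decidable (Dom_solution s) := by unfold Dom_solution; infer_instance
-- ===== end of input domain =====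

-- B replaces A's substring slicing/comparison and string concatenation by, per chunk
-- size, a right-to-left longest-common-extension array and integer arithmetic on
-- lengths (objective: alternative; not faster — B's per-character DP is slower in
-- CPython than A's C-level slicing on large inputs).

-- ===== PORT A =====
-- inner-loop body of A: state (compressed, string, num), index j
def stepA (cs : List Char) (i : Int) (st : List Char × List Char × Int) (j : Int) :
    List Char × List Char × Int :=
  if st.2.1 = PySem.List.slice cs (some j) (some (j + i)) then
    (st.1, st.2.1, st.2.2 + 1)
  else
    (st.1 ++ (if 2 ≤ st.2.2 then PySem.Int.toChars st.2.2 ++ st.2.1 else st.2.1),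
     PySem.List.slice cs (some j) (some (j + i)), 1)

def solution (s : String) : Int :=
  let cs := s.toList
  let answer : Int := cs.length
  (PySem.List.pyRange 1 (PySem.Int.floordiv (cs.length : Int) 2 + 1)).foldl
    (fun answer i =>
      let st0 : List Char × List Char × Int := ([], PySem.List.slice cs (some 0) (some i), 1)
      let st := (PySem.List.pyRange i (cs.length : Int) i).foldl (stepA cs i) st0
      let compressed := st.1 ++ (if 2 ≤ st.2.2 then PySem.Int.toChars st.2.2 ++ st.2.1 else st.2.1)
      min answer (compressed.length : Int))
    answer

-- ===== PORT B =====
-- one step of Source B's LCE loop: append to m (m is never empty, so the getD default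
-- behind Python's m[-1] is never used)
def stepM (cs : List Char) (i : Int) (m : List Int) (k : Int) : List Int :=
  m ++ [if PySem.List.pyGet? cs k = PySem.List.pyGet? cs (k + i)
        then (PySem.List.pyGet? m (-1)).getD 0 + 1 else 0]

-- one step of Source B's chunk loop: state (total, run, start); the m[j-i] read is
-- always in range, so the getD default is never used
def stepB (mlist : List Int) (i : Int) (st : Int × Int × Int) (j : Int) : Int × Int × Int :=
  if i ≤ (PySem.List.pyGet? mlist (j - i)).getD 0 then
    (st.1, st.2.1 + 1, st.2.2)
  else
    (st.1 + i + (if 2 ≤ st.2.1 then ((PySem.Int.toChars st.2.1).length : Int) else 0), 1, j)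

def solution_alt (s : String) : Int :=
  let cs := s.toList
  let n : Int := cs.length
  (PySem.List.pyRange 1 (PySem.Int.floordiv n 2 + 1)).foldl
    (fun best i =>
      let mlist := ((PySem.List.pyRange (n - i - 1) (-1) (-1)).foldl (stepM cs i) [0]).reverse
      let st := (PySem.List.pyRange i n i).foldl (stepB mlist i) (0, 1, 0)
      let total := st.1 + min i (n - st.2.2) +
        (if 2 ≤ st.2.1 then ((PySem.Int.toChars st.2.1).length : Int) else 0)
      min best total)
    n

-- ===== PRECONDITION & SPEC =====
def Spec_solution (s : String) (out : Int) : Prop := out = solution_alt s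
instance (s : String) (out : Int) : Decidable (Spec_solution s out) := by unfold Spec_solution; infer_instance

-- ===== CLAIM (what is proved, stated in full; the proofs are below) =====
def Claim_equal_solution : Prop := ∀ (s : String), Dom_solution s → Spec_solution s (solution s)

-- ===== LEMMAS AND PROOFS =====

def lce (cs : List Char) (i : Nat) (k : Nat) : Int :=
  if _h : k + i < cs.length then
    (if cs[k]? = cs[k+i]? then lce cs i (k+1) + 1 else 0)
  else 0
termination_by cs.length - k

lemma lce_nonneg (cs : List Char) (i k : Nat) : 0 ≤ lce cs i k := by
  fun_induction lce cs i k with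
  | case1 k h heq ih => omega
  | case2 k h heq => exact le_refl 0
  | case3 k h => exact le_refl 0

lemma lce_ge_iff (cs : List Char) (i : Nat) :
    ∀ (m k : Nat), 1 ≤ m →
      ((m : Int) ≤ lce cs i k ↔
        (k + i + m ≤ cs.length ∧ ∀ t, t < m → cs[k+t]? = cs[k+i+t]?)) := by
  intro m
  induction m with
  | zero => omega
  | succ m ih =>
    intro k _
    rw [lce]
    by_cases hm : 1 ≤ m
    · constructor
      · intro h
        split_ifs at h with h1 h2
        · have h3 : (m : Int) ≤ lce cs i (k+1) := by push_cast at h ⊢; omega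
          obtain ⟨hb, hp⟩ := (ih (k+1) hm).mp h3
          refine ⟨by omega, ?_⟩
          intro t ht
          rcases Nat.eq_zero_or_pos t with rfl | htpos
          · simpa using h2
          · obtain ⟨u, rfl⟩ := Nat.exists_eq_add_of_le htpos
            have := hp u (by omega)
            simpa [Nat.add_comm, Nat.add_assoc, Nat.add_left_comm] using this
        · omega
        · omega
      · rintro ⟨hb, hp⟩
        have h1 : k + i < cs.length := by omega
        have h2 : cs[k]? = cs[k+i]? := by simpa using hp 0 (by omega)
        rw [dif_pos h1, if_pos h2]
        have h3 : (m : Int) ≤ lce cs i (k+1) := by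
          rw [ih (k+1) hm]
          refine ⟨by omega, ?_⟩
          intro u hu
          have := hp (1 + u) (by omega)
          simpa [Nat.add_comm, Nat.add_assoc, Nat.add_left_comm] using this
        push_cast; omega
    · -- m = 0 : statement for 1
      have hm0 : m = 0 := by omega
      subst hm0
      constructor
      · intro h
        split_ifs at h with h1 h2
        · refine ⟨by omega, ?_⟩
          intro t ht
          have : t = 0 := by omega
          subst this; simpa using h2
        · omega
        · omega
      · rintro ⟨hb, hp⟩
        have h1 : k + i < cs.length := by omega
        have h2 : cs[k]? = cs[k+i]? := by simpa using hp 0 (by omega)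
        rw [dif_pos h1, if_pos h2]
        have := lce_nonneg cs i (k+1)
        push_cast; omega

lemma takeDropEq_iff (cs : List Char) (iN kN : Nat) (hi : 1 ≤ iN) (hk : kN + iN ≤ cs.length) :
    ((cs.drop kN).take iN = (cs.drop (kN+iN)).take iN) ↔
      (kN + iN + iN ≤ cs.length ∧ ∀ t, t < iN → cs[kN+t]? = cs[kN+iN+t]?) := by
  constructor
  · intro h
    have hlen := congrArg List.length h
    simp only [List.length_take, List.length_drop] at hlen
    have hb : kN + iN + iN ≤ cs.length := by omega
    refine ⟨hb, ?_⟩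
    intro t ht
    have := congrArg (fun l => l[t]?) h
    simpa [List.getElem?_take, List.getElem?_drop, ht, Nat.add_comm, Nat.add_assoc,
      Nat.add_left_comm] using this
  · rintro ⟨hb, hp⟩
    apply List.ext_getElem?
    intro t
    by_cases ht : t < iN
    · have := hp t ht
      simp only [List.getElem?_take, List.getElem?_drop, ht, if_pos]
      rw [show kN + iN + t = kN + (iN + t) by omega] at this
      rw [show kN + iN + t = kN + (iN + t) by omega]
      exact this
    · simp [ht]

lemma chunkEq (cs : List Char) (iN kN : Nat) (hi : 1 ≤ iN) (hk : kN + iN ≤ cs.length) :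
    (PySem.List.slice cs (some (kN:Int)) (some ((kN:Int)+(iN:Int))) =
     PySem.List.slice cs (some ((kN:Int)+(iN:Int))) (some (((kN:Int)+(iN:Int))+(iN:Int)))) ↔
      (iN:Int) ≤ lce cs iN kN := by
  have h1 : PySem.List.slice cs (some (kN:Int)) (some ((kN:Int)+(iN:Int))) = (cs.drop kN).take iN :=
    PySem.List.slice_natCast_add cs kN iN
  have h2 : PySem.List.slice cs (some ((kN:Int)+(iN:Int))) (some (((kN:Int)+(iN:Int))+(iN:Int)))
      = (cs.drop (kN+iN)).take iN := by
    have := PySem.List.slice_natCast_add cs (kN+iN) iN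
    push_cast at this
    convert this using 3
  rw [h1, h2, takeDropEq_iff cs iN kN hi hk, lce_ge_iff cs iN iN kN hi]

lemma pyRange_pos_cons (a b i : Int) (h1 : 0 < i) (h2 : a < b) :
    PySem.List.pyRange a b i = a :: PySem.List.pyRange (a+i) b i := by
  rw [PySem.List.pyRange_of_pos a b h1, PySem.List.pyRange_of_pos (a+i) b h1, if_pos h2]
  by_cases h3 : a + i < b
  · rw [if_pos h3]
    have h4 : b - a + i - 1 = (b - (a+i) + i - 1) + 1 * i := by ring
    have h5 : (b - a + i - 1) / i = (b - (a+i) + i - 1) / i + 1 := by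
      rw [h4, Int.add_mul_ediv_right _ _ (ne_of_gt h1)]
    have h6 : 0 ≤ (b - (a+i) + i - 1) / i := Int.ediv_nonneg (by omega) (le_of_lt h1)
    rw [h5, Int.toNat_add h6 (by norm_num)]
    simp only [Int.toNat_one, List.range_succ_eq_map, List.map_cons, List.map_map]
    congr 1
    · simp
    apply List.map_congr_left
    intro k _
    simp only [Function.comp]
    push_cast; ring
  · rw [if_neg h3]
    have hb : b - a + i - 1 = (b - a - 1) + 1 * i := by ring
    have h5 : (b - a + i - 1) / i = (b - a - 1) / i + 1 := by
      rw [hb, Int.add_mul_ediv_right _ _ (ne_of_gt h1)]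
    have h7 : (b - a - 1) / i = 0 := by
      apply Int.ediv_eq_zero_of_lt <;> omega
    rw [h5, h7]
    simp

lemma pyRange_pos_nil (a b i : Int) (h1 : 0 < i) (h2 : b ≤ a) :
    PySem.List.pyRange a b i = [] := by
  rw [PySem.List.pyRange_of_pos a b h1, if_neg (by omega)]
  simp

def lceDesc (cs : List Char) (i : Nat) : Nat → List Int
  | 0 => [lce cs i 0]
  | a+1 => lce cs i (a+1) :: lceDesc cs i a

lemma stepM_val (cs : List Char) (iN : Nat) (aN : Nat) (pre : List Int)
    (hlast : pre.getLast? = some (lce cs iN (aN+1))) (hb : aN + iN + 1 ≤ cs.length) :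
    stepM cs (iN:Int) pre (aN:Int) = pre ++ [lce cs iN aN] := by
  unfold stepM
  congr 1
  rw [PySem.List.pyGet?_neg_one, hlast]
  have hget : PySem.List.pyGet? cs ((aN:Int)) = cs[aN]? := by simp
  have hget2 : PySem.List.pyGet? cs ((aN:Int) + (iN:Int)) = cs[aN+iN]? := by
    rw [show (aN:Int)+(iN:Int) = ((aN+iN:Nat):Int) by push_cast; ring,
       PySem.List.pyGet?_natCast]
  rw [hget, hget2]
  rw [show lce cs iN aN = if cs[aN]? = cs[aN+iN]? then lce cs iN (aN+1) + 1 else 0 by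
        rw [lce, dif_pos (show aN + iN < cs.length by omega)]]
  rcases eq_or_ne cs[aN]? cs[aN+iN]? with h | h
  · rw [if_pos h, if_pos h]; simp
  · rw [if_neg h, if_neg h]

lemma foldM_desc (cs : List Char) (iN : Nat) :
    ∀ (aN : Nat), aN + iN + 1 ≤ cs.length →
      ∀ (pre : List Int), pre.getLast? = some (lce cs iN (aN+1)) →
        (PySem.List.pyRange (aN:Int) (-1) (-1)).foldl (stepM cs (iN:Int)) pre =
          pre ++ lceDesc cs iN aN := by
  intro aN
  induction aN with
  | zero =>
    intro hb pre hlast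
    rw [PySem.List.pyRange_neg_one_cons (show (-1:Int) < ((0:Nat):Int) by norm_num)]
    rw [show ((0:Nat):Int) - 1 = -1 by norm_num]
    rw [PySem.List.pyRange_neg_one_eq_nil (le_refl _)]
    simp only [List.foldl_cons, List.foldl_nil]
    rw [stepM_val cs iN 0 pre hlast (by omega)]
    rfl
  | succ a ih =>
    intro hb pre hlast
    have hc : ((a+1:Nat):Int) = (a:Int) + 1 := by push_cast; ring
    rw [hc, PySem.List.pyRange_neg_one_cons (show (-1:Int) < (a:Int)+1 by omega)]
    simp only [List.foldl_cons]
    have hst := stepM_val cs iN (a+1) pre hlast (by omega)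
    rw [hc] at hst
    rw [hst]
    rw [show ((a:Int) + 1 - 1) = (a:Int) by ring]
    rw [ih (by omega) (pre ++ [lce cs iN (a+1)]) (by simp)]
    simp [lceDesc]

lemma lceDesc_reverse (cs : List Char) (iN : Nat) :
    ∀ aN, (lceDesc cs iN aN).reverse = (List.range (aN+1)).map (lce cs iN) := by
  intro aN
  induction aN with
  | zero => rfl
  | succ a ih =>
    rw [lceDesc, List.reverse_cons, ih]
    simp [List.range_succ]

lemma slice_len_min (cs : List Char) (iN a : Nat) (ha : a ≤ cs.length) :
    ((PySem.List.slice cs (some (a:Int)) (some ((a:Int)+(iN:Int)))).length : Int)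
      = min (iN:Int) ((cs.length:Int) - a) := by
  rw [PySem.List.slice_natCast_add]
  simp only [List.length_take, List.length_drop]
  omega

lemma finEq (cs : List Char) (iN startN : Nat) (comp : List Char) (num : Int)
    (hs : startN ≤ cs.length) :
    ((comp ++ (if 2 ≤ num then PySem.Int.toChars num ++
          PySem.List.slice cs (some (startN:Int)) (some ((startN:Int)+(iN:Int)))
        else PySem.List.slice cs (some (startN:Int)) (some ((startN:Int)+(iN:Int))))).length : Int)
      = (comp.length:Int) + min (iN:Int) ((cs.length:Int) - startN) +
        (if 2 ≤ num then ((PySem.Int.toChars num).length : Int) else 0) := by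
  split_ifs with h
  · simp only [List.length_append]
    push_cast
    rw [slice_len_min cs iN startN hs]
    ring
  · simp only [List.length_append]
    push_cast
    rw [slice_len_min cs iN startN hs]
    ring

lemma loopEq (cs : List Char) (iN : Nat) (M : List Int) (h1 : 1 ≤ iN) (h2 : 2*iN ≤ cs.length)
    (hM : ∀ kN : Nat, kN < cs.length - iN → PySem.List.pyGet? M (kN:Int) = some (lce cs iN kN)) :
    ∀ (fuel jN startN : Nat) (comp : List Char) (num : Int),
      cs.length ≤ jN + fuel → iN ≤ jN → startN + iN ≤ jN → jN < cs.length + iN →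
      PySem.List.slice cs (some (startN:Int)) (some ((startN:Int)+(iN:Int)))
        = PySem.List.slice cs (some ((jN:Int)-(iN:Int))) (some (jN:Int)) →
      (let stA := (PySem.List.pyRange (jN:Int) (cs.length:Int) (iN:Int)).foldl (stepA cs (iN:Int))
          (comp, PySem.List.slice cs (some (startN:Int)) (some ((startN:Int)+(iN:Int))), num)
       ((stA.1 ++ (if 2 ≤ stA.2.2 then PySem.Int.toChars stA.2.2 ++ stA.2.1 else stA.2.1)).length : Int))
      = (let stB := (PySem.List.pyRange (jN:Int) (cs.length:Int) (iN:Int)).foldl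
            (stepB M (iN:Int)) ((comp.length:Int), num, (startN:Int))
         stB.1 + min (iN:Int) ((cs.length:Int) - stB.2.2) +
           (if 2 ≤ stB.2.1 then ((PySem.Int.toChars stB.2.1).length : Int) else 0)) := by
  intro fuel
  induction fuel with
  | zero =>
    intro jN startN comp num hf hij hsj hjn hprev
    rw [pyRange_pos_nil _ _ _ (by exact_mod_cast h1) (by exact_mod_cast hf)]
    simp only [List.foldl_nil]
    have hs : startN ≤ cs.length := by omega
    exact finEq cs iN startN comp num hs
  | succ fuel ih =>
    intro jN startN comp num hf hij hsj hjn hprev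
    by_cases hlt : jN < cs.length
    · have hi' : (0:Int) < (iN:Int) := by exact_mod_cast h1
      have hlt' : ((jN:Int)) < ((cs.length:Int)) := by exact_mod_cast hlt
      rw [pyRange_pos_cons _ _ _ hi' hlt']
      simp only [List.foldl_cons]
      have hcast1 : (jN:Int) - (iN:Int) = ((jN - iN : Nat):Int) := by omega
      have hcond : (PySem.List.slice cs (some (startN:Int)) (some ((startN:Int)+(iN:Int)))
          = PySem.List.slice cs (some (jN:Int)) (some ((jN:Int) + (iN:Int))))
          ↔ (iN:Int) ≤ lce cs iN (jN - iN) := by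
        rw [hprev]
        have e2 : (jN:Int) + (iN:Int) = (((jN - iN : Nat):Int) + (iN:Int)) + (iN:Int) := by
          omega
        have e1 : (jN:Int) = ((jN - iN : Nat):Int) + (iN:Int) := by omega
        rw [hcast1, e2, e1]
        exact chunkEq cs iN (jN - iN) h1 (by omega)
      have hgetM : (PySem.List.pyGet? M ((jN:Int) - (iN:Int))).getD 0 = lce cs iN (jN - iN) := by
        rw [hcast1, hM (jN - iN) (by omega)]
        rfl
      by_cases hc : (iN:Int) ≤ lce cs iN (jN - iN)
      · have hA : stepA cs (iN:Int)
            (comp, PySem.List.slice cs (some (startN:Int)) (some ((startN:Int)+(iN:Int))), num)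
            (jN:Int)
            = (comp, PySem.List.slice cs (some (startN:Int)) (some ((startN:Int)+(iN:Int))), num + 1) := by
          unfold stepA
          rw [if_pos (hcond.mpr hc)]
        have hB : stepB M (iN:Int) ((comp.length:Int), num, (startN:Int)) (jN:Int)
            = ((comp.length:Int), num + 1, (startN:Int)) := by
          unfold stepB
          rw [if_pos (by rw [hgetM]; exact hc)]
        rw [hA, hB]
        have e3 : (jN:Int) + (iN:Int) = ((jN + iN : Nat):Int) := by push_cast; ring
        rw [e3]
        apply ih (jN+iN) startN comp (num+1) (by omega) (by omega) (by omega) (by omega)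
        have e4 : ((jN + iN : Nat):Int) - (iN:Int) = (jN:Int) := by push_cast; ring
        have e5 : ((jN + iN : Nat):Int) = (jN:Int) + (iN:Int) := by push_cast; ring
        rw [e4, e5]
        exact hcond.mpr hc
      · have hslen : ((PySem.List.slice cs (some (startN:Int)) (some ((startN:Int)+(iN:Int)))).length : Int)
            = (iN:Int) := by
          rw [slice_len_min cs iN startN (by omega)]
          have h9 : (iN:Int) ≤ (cs.length:Int) - (startN:Int) := by omega
          omega
        have hA : stepA cs (iN:Int)
            (comp, PySem.List.slice cs (some (startN:Int)) (some ((startN:Int)+(iN:Int))), num)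
            (jN:Int)
            = (comp ++ (if 2 ≤ num then PySem.Int.toChars num ++
                  PySem.List.slice cs (some (startN:Int)) (some ((startN:Int)+(iN:Int)))
                else PySem.List.slice cs (some (startN:Int)) (some ((startN:Int)+(iN:Int)))),
               PySem.List.slice cs (some (jN:Int)) (some ((jN:Int) + (iN:Int))), 1) := by
          unfold stepA
          rw [if_neg (fun h => hc (hcond.mp h))]
        have hB : stepB M (iN:Int) ((comp.length:Int), num, (startN:Int)) (jN:Int)
            = (((comp ++ (if 2 ≤ num then PySem.Int.toChars num ++
                  PySem.List.slice cs (some (startN:Int)) (some ((startN:Int)+(iN:Int)))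
                else PySem.List.slice cs (some (startN:Int)) (some ((startN:Int)+(iN:Int))))).length : Int),
               1, (jN:Int)) := by
          unfold stepB
          rw [if_neg (by rw [hgetM]; exact hc)]
          have hlen : ((comp ++ (if 2 ≤ num then PySem.Int.toChars num ++
                  PySem.List.slice cs (some (startN:Int)) (some ((startN:Int)+(iN:Int)))
                else PySem.List.slice cs (some (startN:Int)) (some ((startN:Int)+(iN:Int))))).length : Int)
              = (comp.length:Int) + (iN:Int) + (if 2 ≤ num then ((PySem.Int.toChars num).length : Int) else 0) := by
            split_ifs with h
            · simp only [List.length_append]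
              push_cast
              rw [hslen]
              ring
            · simp only [List.length_append]
              push_cast
              rw [hslen]
              ring
          rw [hlen]
        rw [hA, hB]
        have e3 : (jN:Int) + (iN:Int) = ((jN + iN : Nat):Int) := by push_cast; ring
        rw [e3]
        have hgoal := ih (jN+iN) jN
          (comp ++ (if 2 ≤ num then PySem.Int.toChars num ++
              PySem.List.slice cs (some (startN:Int)) (some ((startN:Int)+(iN:Int)))
            else PySem.List.slice cs (some (startN:Int)) (some ((startN:Int)+(iN:Int))))) 1
          (by omega) (by omega) (by omega) (by omega)
          (by
            have e4 : ((jN + iN : Nat):Int) - (iN:Int) = (jN:Int) := by push_cast; ring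
            have e5 : ((jN + iN : Nat):Int) = (jN:Int) + (iN:Int) := by push_cast; ring
            rw [e4, e5])
        convert hgoal using 4
    · rw [pyRange_pos_nil _ _ _ (by exact_mod_cast h1) (by exact_mod_cast (by omega : cs.length ≤ jN))]
      simp only [List.foldl_nil]
      have hs : startN ≤ cs.length := by omega
      exact finEq cs iN startN comp num hs

lemma mlist_spec (cs : List Char) (iN : Nat) (h1 : 1 ≤ iN) (h2 : 2*iN ≤ cs.length) :
    ∀ kN : Nat, kN < cs.length - iN →
      PySem.List.pyGet? (((PySem.List.pyRange ((cs.length:Int) - (iN:Int) - 1) (-1) (-1)).foldl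
          (stepM cs (iN:Int)) [0]).reverse) (kN:Int) = some (lce cs iN kN) := by
  intro kN hk
  have haN : (cs.length:Int) - (iN:Int) - 1 = ((cs.length - iN - 1 : Nat):Int) := by omega
  have hl0 : ([ (0:Int) ]).getLast? = some (lce cs iN (cs.length - iN - 1 + 1)) := by
    have : lce cs iN (cs.length - iN - 1 + 1) = 0 := by
      rw [lce, dif_neg (by omega)]
    rw [this]
    rfl
  rw [haN, foldM_desc cs iN (cs.length - iN - 1) (by omega) [0] hl0]
  rw [List.reverse_append, lceDesc_reverse]
  have ha1 : cs.length - iN - 1 + 1 = cs.length - iN := by omega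
  rw [ha1, List.reverse_singleton, PySem.List.pyGet?_natCast]
  rw [List.getElem?_append_left (by simpa using hk)]
  simp [hk]

lemma bodyEq (cs : List Char) (answer i : Int) (h1 : 1 ≤ i) (h2 : 2*i ≤ (cs.length:Int)) :
    (let st0 : List Char × List Char × Int := ([], PySem.List.slice cs (some 0) (some i), 1)
     let st := (PySem.List.pyRange i (cs.length:Int) i).foldl (stepA cs i) st0
     let compressed := st.1 ++ (if 2 ≤ st.2.2 then PySem.Int.toChars st.2.2 ++ st.2.1 else st.2.1)
     min answer (compressed.length : Int))
    = (let mlist := ((PySem.List.pyRange ((cs.length:Int) - i - 1) (-1) (-1)).foldl (stepM cs i) [0]).reverse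
       let st := (PySem.List.pyRange i (cs.length:Int) i).foldl (stepB mlist i) (0, 1, 0)
       let total := st.1 + min i ((cs.length:Int) - st.2.2) +
         (if 2 ≤ st.2.1 then ((PySem.Int.toChars st.2.1).length : Int) else 0)
       min answer total) := by
  obtain ⟨iN, rfl⟩ : ∃ iN : Nat, i = (iN:Int) := ⟨i.toNat, by omega⟩
  have h1' : 1 ≤ iN := by exact_mod_cast h1
  have h2' : 2*iN ≤ cs.length := by
    have : ((2*iN : Nat):Int) ≤ (cs.length:Int) := by push_cast; omega
    exact_mod_cast this
  simp only []
  congr 1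
  have hprev0 : PySem.List.slice cs (some ((0:Nat):Int)) (some (((0:Nat):Int)+(iN:Int)))
      = PySem.List.slice cs (some ((iN:Int)-(iN:Int))) (some (iN:Int)) := by norm_num
  have hmain := loopEq cs iN
    (((PySem.List.pyRange ((cs.length:Int) - (iN:Int) - 1) (-1) (-1)).foldl (stepM cs (iN:Int)) [0]).reverse)
    h1' h2' (mlist_spec cs iN h1' h2') cs.length iN 0 ([] : List Char) 1
    (by omega) (le_refl _) (by omega) (by omega) hprev0
  simp only [] at hmain
  norm_num at hmain ⊢
  exact hmain

-- ===== VERDICT (by name: the statement is the Claim_ definition above) =====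
theorem solution_spec : Claim_equal_solution := by
  intro s _
  unfold Spec_solution solution solution_alt
  apply PySem.List.foldl_congr_mem
  intro acc i hi
  rw [PySem.List.mem_pyRange_one] at hi
  have hfd : i ≤ PySem.Int.floordiv (s.toList.length : Int) 2 := by omega
  have h2i : 2 * i ≤ (s.toList.length : Int) := by
    have := (PySem.Int.le_floordiv_iff_mul_le (a := (s.toList.length : Int))
      (b := 2) (q := i) (by norm_num)).mp hfd
    omega
  exact bodyEq s.toList acc i hi.1 h2i
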